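-- pv_equiv track=rewrite | github.com/sebacatalan/algoritmos_prueba_1 | matriz_min.py | menor_x
-- ===== SOURCE A (Python) =====
-- def menor_x(matriz):#uno busca el numero mas pequeño de la fila z mientras que el otro el mas negativo y lo almacena en en a y b respectivamente
--     a=0
--     b=0
--     for i in range(2,len(matriz[0])):
--         if matriz[1][i]>0:
--             a=matriz[1][i]
--         elif matriz[1][i]<0:
--             b=matriz[1][i]
--     return a,b
-- ===== SOURCE B (Python) =====
-- def menor_x(matriz):
--     # Backward scan with early exit: the first positive / first negative seen
--     # from the end are A's last-overwritten a and b; stops once both are found.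
--     a = b = 0
--     found_a = found_b = False
--     i = len(matriz[0]) - 1
--     while i >= 2 and not (found_a and found_b):
--         v = matriz[1][i]
--         if v > 0 and not found_a:
--             a, found_a = v, True
--         elif v < 0 and not found_b:
--             b, found_b = v, True
--         i -= 1
--     return a, b
-- ===== Notes on version B (the rewrite author's own statement) =====
-- stated objective: alternative
-- what changed: Replaces A's full forward pass that overwrites a/b on every positive/negative with a backward scan from len(matriz[0])-1 down to 2 that records the first positive and first negative seen and breaks out early once both are found.
import Mathlib
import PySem

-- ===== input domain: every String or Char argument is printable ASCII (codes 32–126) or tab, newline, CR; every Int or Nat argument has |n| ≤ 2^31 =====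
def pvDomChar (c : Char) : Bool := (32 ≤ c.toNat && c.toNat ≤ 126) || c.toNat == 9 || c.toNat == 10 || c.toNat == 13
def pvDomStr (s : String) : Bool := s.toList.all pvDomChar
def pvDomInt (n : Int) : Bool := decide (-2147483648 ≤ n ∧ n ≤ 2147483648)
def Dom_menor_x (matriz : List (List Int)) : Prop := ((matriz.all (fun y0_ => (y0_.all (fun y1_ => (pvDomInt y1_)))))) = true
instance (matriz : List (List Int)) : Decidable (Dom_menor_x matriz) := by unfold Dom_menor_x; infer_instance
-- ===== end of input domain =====

-- B is an early-exit backward scan (first positive / first negative from the end) instead of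
-- A's full forward pass with overwriting; same return value wherever A returns (Pre_).

-- ===== PORT A =====
-- forward pass: for i in range(2, len(matriz[0])): overwrite a on positive, b on negative
def menor_x (matriz : List (List Int)) : Int × Int :=
  (PySem.List.pyRange 2 (((PySem.List.pyGet? matriz 0).getD []).length : Int) 1).foldl
    (fun (ab : Int × Int) i =>
      -- matriz[1][i]; in range for every admitted input (Pre_), so getD 0 is never the default
      let v := (PySem.List.pyGet? ((PySem.List.pyGet? matriz 1).getD []) i).getD 0
      if v > 0 then (v, ab.2) else if v < 0 then (ab.1, v) else ab)
    (0, 0)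

-- ===== PORT B =====
-- while i >= 2 and not (found_a and found_b): read matriz[1][i], record first hits, i -= 1
def menorAltLoop (row : List Int) (i : Nat) (a b : Int) (fa fb : Bool) : Int × Int :=
  if i < 2 ∨ (fa && fb) then (a, b)
  else
    -- matriz[1][i]; in range for every admitted input (Pre_), so getD 0 is never the default
    let v := (PySem.List.pyGet? row (i : Int)).getD 0
    if v > 0 ∧ fa = false then menorAltLoop row (i - 1) v b true fb
    else if v < 0 ∧ fb = false then menorAltLoop row (i - 1) a v fa true
    else menorAltLoop row (i - 1) a b fa fb
  termination_by i
  decreasing_by all_goals omega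

def menor_x_alt (matriz : List (List Int)) : Int × Int :=
  menorAltLoop ((PySem.List.pyGet? matriz 1).getD [])
    (((PySem.List.pyGet? matriz 0).getD []).length - 1) 0 0 false false

-- ===== PRECONDITION & SPEC =====
-- Pre_ is exactly where the Python A returns (no IndexError): matriz is nonempty, and if
-- row 0 has more than 2 entries then row 1 exists and is at least as long as row 0.
def Pre_menor_x (matriz : List (List Int)) : Prop :=
  matriz ≠ [] ∧
    ((matriz.getD 0 []).length ≤ 2 ∨
      (2 ≤ matriz.length ∧ (matriz.getD 0 []).length ≤ (matriz.getD 1 []).length))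
instance (matriz : List (List Int)) : Decidable (Pre_menor_x matriz) := by
  unfold Pre_menor_x; infer_instance

def pvWitness_menor_x : List (List Int) := [[1, 2, 3], [5, -4, 7]]

def Spec_menor_x (matriz : List (List Int)) (out : Int × Int) : Prop := out = menor_x_alt matriz
instance (matriz : List (List Int)) (out : Int × Int) : Decidable (Spec_menor_x matriz out) := by
  unfold Spec_menor_x; infer_instance

-- ===== CLAIM (what is proved, stated in full; the proofs are below) =====
def Claim_equal_menor_x : Prop :=
  ∀ (matriz : List (List Int)), Dom_menor_x matriz → Pre_menor_x matriz →
    Spec_menor_x matriz (menor_x matriz)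

-- ===== LEMMAS AND PROOFS =====

-- value A and B both read at index i of row 1 (total via getD; in range under Pre_)
def menorVal (row : List Int) (i : Int) : Int := (PySem.List.pyGet? row i).getD 0

-- the values at indices i, i-1, …, 2 (the order B visits them)
def menorDvals (row : List Int) : Nat → List Int
  | i => if i < 2 then [] else menorVal row (i : Int) :: menorDvals row (i - 1)
  termination_by i => i
  decreasing_by omega

-- B's loop returns, per component, the first match of the descending value list (unless flagged)
@[simp] lemma menorVal_def (row : List Int) (i : Int) :
    (PySem.List.pyGet? row i).getD 0 = menorVal row i := rfl

lemma menorAltLoop_eq (row : List Int) :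
    ∀ i a b fa fb, menorAltLoop row i a b fa fb =
      ((if fa then a else ((menorDvals row i).find? (fun v => decide (0 < v))).getD a),
       (if fb then b else ((menorDvals row i).find? (fun v => decide (v < 0))).getD b)) := by
  intro i
  induction i using Nat.strong_induction_on with
  | _ i ih =>
    intro a b fa fb
    rw [menorAltLoop, menorDvals]
    by_cases h2 : i < 2
    · simp [h2]
    · rw [if_neg h2]
      cases fa <;> cases fb
      all_goals first
        | (-- fa = fb = true: loop stops
           simp [h2]; done)
        | (rw [if_neg (by simp [h2])]
           simp only [menorVal_def]
           generalize menorVal row (i : Int) = v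
           rcases lt_trichotomy v 0 with hn | h0 | hp
           · have h' : ¬ 0 < v := by omega
             simp [hn, h', ih (i - 1) (by omega)]
           · simp [h0, ih (i - 1) (by omega)]
           · have h' : ¬ v < 0 := by omega
             simp [hp, h', ih (i - 1) (by omega)])

-- A's fold returns, per component, the last match = first match of the reversed value list
lemma menorFold_eq :
    ∀ (l : List Int) (a b : Int),
      l.foldl (fun (ab : Int × Int) v =>
          if v > 0 then (v, ab.2) else if v < 0 then (ab.1, v) else ab) (a, b) =
        (((l.reverse.find? (fun v => decide (0 < v))).getD a),
         ((l.reverse.find? (fun v => decide (v < 0))).getD b)) := by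
  intro l
  induction l with
  | nil => intro a b; simp
  | cons v l ih =>
    intro a b
    simp only [List.foldl_cons, List.reverse_cons, List.find?_append]
    by_cases hp : v > 0
    · have : ¬ v < 0 := by omega
      rw [if_pos hp, ih]
      cases hA : l.reverse.find? (fun v => decide (0 < v)) <;>
      cases hB : l.reverse.find? (fun v => decide (v < 0)) <;>
      simp [hp, this]
    · by_cases hn : v < 0
      · rw [if_neg hp, if_pos hn, ih]
        cases hA : l.reverse.find? (fun v => decide (0 < v)) <;>
        cases hB : l.reverse.find? (fun v => decide (v < 0)) <;>
        simp [hp, hn]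
      · rw [if_neg hp, if_neg hn, ih]
        cases hA : l.reverse.find? (fun v => decide (0 < v)) <;>
        cases hB : l.reverse.find? (fun v => decide (v < 0)) <;>
        simp [hp, hn]

-- descending value list = reverse of the ascending one A traverses
lemma menorDvals_eq (row : List Int) :
    ∀ n : Nat, menorDvals row (n - 1) =
      ((PySem.List.pyRange 2 (n : Int) 1).map (menorVal row)).reverse := by
  intro n
  induction n with
  | zero =>
    rw [menorDvals]
    simp [PySem.List.pyRange_one_eq_nil (by omega : (0:Int) ≤ 2)]
  | succ n ih =>
    by_cases h2 : n < 2
    · have hle : ((n + 1 : Nat) : Int) ≤ 2 := by push_cast; omega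
      rw [show n + 1 - 1 = n by omega, menorDvals]
      simp [h2, PySem.List.pyRange_one_eq_nil (show ((n : Int) + 1) ≤ 2 by omega)]
    · rw [show n + 1 - 1 = n by omega, menorDvals]
      simp only [h2, if_false]
      rw [show ((n + 1 : Nat) : Int) = (n : Int) + 1 by push_cast; ring,
        PySem.List.pyRange_one_succ_right (by exact_mod_cast (by omega : 2 ≤ n))]
      simp [ih]

theorem menor_x_spec_aux (matriz : List (List Int)) :
    menor_x matriz = menor_x_alt matriz := by
  unfold menor_x menor_x_alt
  set row := (PySem.List.pyGet? matriz 1).getD [] with hrow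
  set n := ((PySem.List.pyGet? matriz 0).getD []).length with hn
  rw [menorAltLoop_eq, menorDvals_eq row n]
  have hfold : (PySem.List.pyRange 2 (n : Int) 1).foldl
      (fun (ab : Int × Int) i =>
        let v := (PySem.List.pyGet? row i).getD 0
        if v > 0 then (v, ab.2) else if v < 0 then (ab.1, v) else ab) (0, 0)
      = ((PySem.List.pyRange 2 (n : Int) 1).map (menorVal row)).foldl
        (fun (ab : Int × Int) v =>
          if v > 0 then (v, ab.2) else if v < 0 then (ab.1, v) else ab) (0, 0) := by
    rw [List.foldl_map]
    rfl
  rw [hfold, menorFold_eq]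
  simp

-- ===== VERDICT (by name: the statement is the Claim_ definition above) =====
theorem menor_x_spec : Claim_equal_menor_x := by
  intro matriz _ _
  exact menor_x_spec_aux matriz
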